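-- pv_equiv track=rewrite | github.com/Anjiang-Wei/EquivalenceSet | algorithm.py | compute_switch_cost
-- ===== SOURCE A (Python) =====
-- def compute_switch_cost(prev_bvh, cur_bvh):
--     if prev_bvh == cur_bvh:
--         return 0
--     cost_per_switch = 10
--     exchange_time = 0
--     for prev_pset in prev_bvh:
--         for cur_pset in cur_bvh:
--             if len(prev_pset & cur_pset) > 0:
--                 exchange_time += 1
--     return exchange_time * cost_per_switch
-- ===== SOURCE B (Python) =====
-- def compute_switch_cost(prev_bvh, cur_bvh):
--     if prev_bvh == cur_bvh:
--         return 0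
--     # inverted index: element -> list of indices of cur sets containing it
--     idx = {}
--     for j, cur_pset in enumerate(cur_bvh):
--         for x in cur_pset:
--             idx.setdefault(x, []).append(j)
--     hits = 0
--     for prev_pset in prev_bvh:
--         seen = set()
--         for x in prev_pset:
--             seen.update(idx.get(x, ()))
--         hits += len(seen)
--     return hits * 10
-- ===== Notes on version B (the rewrite author's own statement) =====
-- stated objective: faster
-- what changed: replaces the all-pairs intersection scan with an inverted element-to-cur-set-index map built once; each prev set then unions the hit index lists and counts distinct indices
import Mathlib
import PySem

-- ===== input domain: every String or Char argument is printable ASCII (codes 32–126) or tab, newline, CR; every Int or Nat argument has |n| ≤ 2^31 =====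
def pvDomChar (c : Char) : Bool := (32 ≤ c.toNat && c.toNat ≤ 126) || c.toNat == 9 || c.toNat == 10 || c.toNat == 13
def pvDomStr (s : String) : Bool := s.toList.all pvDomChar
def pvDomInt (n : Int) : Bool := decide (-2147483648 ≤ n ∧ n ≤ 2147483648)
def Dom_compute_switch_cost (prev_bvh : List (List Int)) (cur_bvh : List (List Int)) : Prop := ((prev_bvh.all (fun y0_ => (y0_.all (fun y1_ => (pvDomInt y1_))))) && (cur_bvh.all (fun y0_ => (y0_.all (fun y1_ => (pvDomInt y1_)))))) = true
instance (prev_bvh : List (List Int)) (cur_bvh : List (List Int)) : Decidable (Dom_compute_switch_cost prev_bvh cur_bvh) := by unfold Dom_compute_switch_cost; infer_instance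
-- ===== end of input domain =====

-- ===== PORT A =====
-- B replaces the all-pairs set-intersection scan with an inverted element->cur-index map (objective: faster).
-- Python '==' on lists of sets: positionwise set equality (shared helper for both ports).
def csc_bvhEq : List (List Int) → List (List Int) → Bool
  | [], [] => true
  | p :: ps, c :: cs => PySem.Set.equal p c && csc_bvhEq ps cs
  | _, _ => false

def compute_switch_cost (prev_bvh : List (List Int)) (cur_bvh : List (List Int)) : Int :=
  if csc_bvhEq prev_bvh cur_bvh then 0
  else
    (prev_bvh.foldl (fun exchange_time prev_pset =>
        cur_bvh.foldl (fun exchange_time cur_pset =>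
            if 0 < (PySem.Set.inter prev_pset cur_pset).length then exchange_time + 1
            else exchange_time)
          exchange_time)
      0) * 10

-- ===== PORT B =====
-- idx.setdefault(x, []).append(j) over 'for j, cur_pset in enumerate(cur_bvh): for x in cur_pset:'
def csc_buildIdx (cur_bvh : List (List Int)) : PySem.Dict Int (List Int) :=
  (PySem.List.enumerate cur_bvh).foldl
    (fun d jc => jc.2.foldl (fun d x => d.modify x [] (fun l => l ++ [jc.1])) d)
    PySem.Dict.empty

def compute_switch_cost_alt (prev_bvh : List (List Int)) (cur_bvh : List (List Int)) : Int :=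
  if csc_bvhEq prev_bvh cur_bvh then 0
  else
    let idx := csc_buildIdx cur_bvh
    (prev_bvh.foldl (fun hits prev_pset =>
        hits + PySem.Set.len
          (prev_pset.foldl (fun seen x => PySem.Set.update seen (idx.getD x []))
            PySem.Set.empty))
      0) * 10

-- ===== PRECONDITION & SPEC =====
def Spec_compute_switch_cost (prev_bvh : List (List Int)) (cur_bvh : List (List Int)) (out : Int) : Prop := out = compute_switch_cost_alt prev_bvh cur_bvh
instance (prev_bvh : List (List Int)) (cur_bvh : List (List Int)) (out : Int) : Decidable (Spec_compute_switch_cost prev_bvh cur_bvh out) := by unfold Spec_compute_switch_cost; infer_instance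

-- ===== CLAIM (what is proved, stated in full; the proofs are below) =====
def Claim_equal_compute_switch_cost : Prop := ∀ (prev_bvh : List (List Int)) (cur_bvh : List (List Int)), Dom_compute_switch_cost prev_bvh cur_bvh → Spec_compute_switch_cost prev_bvh cur_bvh (compute_switch_cost prev_bvh cur_bvh)

-- ===== LEMMAS AND PROOFS =====

-- B's per-prev-set count: distinct cur indices hit through the inverted map
def cscSeen (idx : PySem.Dict Int (List Int)) (p : List Int) : PySem.Set Int :=
  p.foldl (fun seen x => PySem.Set.update seen (idx.getD x [])) PySem.Set.empty

lemma csc_mem_foldl_update (idx : PySem.Dict Int (List Int)) (p : List Int)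
    (s : PySem.Set Int) (j : Int) :
    j ∈ p.foldl (fun seen x => PySem.Set.update seen (idx.getD x [])) s ↔
      j ∈ s ∨ ∃ x ∈ p, j ∈ idx.getD x [] := by
  induction p generalizing s with
  | nil => simp
  | cons y ys ih =>
    simp only [List.foldl_cons, ih, PySem.Set.mem_update, List.mem_cons]
    constructor
    · rintro ((h | h) | ⟨x, hx, h⟩)
      · exact Or.inl h
      · exact Or.inr ⟨y, Or.inl rfl, h⟩
      · exact Or.inr ⟨x, Or.inr hx, h⟩
    · rintro (h | ⟨x, (rfl | hx), h⟩)
      · exact Or.inl (Or.inl h)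
      · exact Or.inl (Or.inr h)
      · exact Or.inr ⟨x, hx, h⟩

lemma csc_nodup_foldl_update (idx : PySem.Dict Int (List Int)) (p : List Int)
    (s : PySem.Set Int) (hs : s.Nodup) :
    (p.foldl (fun seen x => PySem.Set.update seen (idx.getD x [])) s).Nodup := by
  induction p generalizing s with
  | nil => exact hs
  | cons y ys ih => exact ih _ (PySem.Set.nodup_update _ _ hs)

-- the nested build loop equals one flat fold over all (element, index) pairs
lemma csc_buildIdx_flat (l : List (Int × List Int)) (d : PySem.Dict Int (List Int)) :
    l.foldl (fun d jc => jc.2.foldl (fun d x => d.modify x [] (fun v => v ++ [jc.1])) d) d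
      = (l.flatMap (fun jc => jc.2.map (fun x => (x, jc.1)))).foldl
          (fun d p => d.modify p.1 [] (fun v => v ++ [p.2])) d := by
  induction l generalizing d with
  | nil => rfl
  | cons jc rest ih =>
    simp only [List.foldl_cons, List.flatMap_cons, List.foldl_append, ih, List.foldl_map]

lemma csc_mem_map_snd_filter (l : List (Int × Int)) (x j : Int) :
    j ∈ (l.filter (fun p => p.1 == x)).map (·.2) ↔ (x, j) ∈ l := by
  simp only [List.mem_map, List.mem_filter, beq_iff_eq]
  constructor
  · rintro ⟨⟨a, b⟩, ⟨hl, rfl⟩, rfl⟩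
    exact hl
  · intro h
    exact ⟨(x, j), ⟨h, rfl⟩, rfl⟩

lemma csc_mem_buildIdx (cur_bvh : List (List Int)) (x j : Int) :
    j ∈ (csc_buildIdx cur_bvh).getD x [] ↔
      ∃ k : Nat, k < cur_bvh.length ∧ j = (k : Int) ∧ x ∈ cur_bvh.getD k [] := by
  unfold csc_buildIdx
  rw [csc_buildIdx_flat, PySem.Dict.getD_foldl_modify_append, PySem.Dict.getD_empty,
    List.nil_append, csc_mem_map_snd_filter]
  simp only [List.mem_flatMap, PySem.List.mem_enumerate_iff, List.mem_map, Prod.mk.injEq]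
  constructor
  · rintro ⟨jc, ⟨k, hk, rfl⟩, y, hy, rfl, rfl⟩
    exact ⟨k, hk, by simp, by rw [List.getD_eq_getElem _ _ hk]; exact hy⟩
  · rintro ⟨k, hk, rfl, hmem⟩
    exact ⟨((k : Int), cur_bvh[k]), ⟨k, hk, by simp⟩, x,
      by rw [List.getD_eq_getElem _ _ hk] at hmem; exact hmem, rfl, by simp⟩

-- A's pair predicate, as a Bool on the cur set
lemma csc_inter_pos (p c : List Int) :
    (0 < (PySem.Set.inter p c).length) ↔ ∃ x ∈ p, x ∈ c := by
  rw [List.length_pos_iff_exists_mem]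
  constructor
  · rintro ⟨y, hy⟩
    exact ⟨y, (PySem.Set.mem_inter p c y).1 hy⟩
  · rintro ⟨x, hx, hxc⟩
    exact ⟨x, (PySem.Set.mem_inter p c x).2 ⟨hx, hxc⟩⟩

lemma csc_countP_range (l : List (List Int)) (P : List Int → Bool) :
    l.countP P = ((List.range l.length).filter (fun k => P (l.getD k []))).length := by
  induction l with
  | nil => simp
  | cons c cs ih =>
    rw [List.countP_cons, List.length_cons, List.range_succ_eq_map, List.filter_cons]
    simp only [List.getD_cons_zero, List.filter_map, Function.comp_def, Nat.succ_eq_add_one,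
      List.getD_cons_succ]
    by_cases h : P c
    · simp [h, ih, List.length_map]
    · simp [h, ih, List.length_map]

-- per prev set: A's inner scan count = size of B's seen set
lemma csc_per_prev (cur_bvh : List (List Int)) (p : List Int) :
    (cur_bvh.countP (fun c => decide (0 < (PySem.Set.inter p c).length)) : Int)
      = PySem.Set.len (cscSeen (csc_buildIdx cur_bvh) p) := by
  have hnodup : (cscSeen (csc_buildIdx cur_bvh) p).Nodup :=
    csc_nodup_foldl_update _ _ _ List.nodup_nil
  set L : List Int :=
    ((List.range cur_bvh.length).filter
      (fun k => decide (0 < (PySem.Set.inter p (cur_bvh.getD k [])).length))).map Int.ofNat with hL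
  have hLnodup : L.Nodup :=
    ((List.nodup_range).filter _).map (fun a b h => Int.ofNat.inj h)
  have hmem : ∀ j, j ∈ cscSeen (csc_buildIdx cur_bvh) p ↔ j ∈ L := by
    intro j
    unfold cscSeen
    rw [csc_mem_foldl_update, hL]
    simp only [List.mem_map, List.mem_filter, List.mem_range, PySem.Set.empty,
      List.not_mem_nil, false_or, csc_mem_buildIdx, decide_eq_true_eq, csc_inter_pos]
    constructor
    · rintro ⟨x, hx, k, hk, rfl, hmemc⟩
      exact ⟨k, ⟨hk, x, hx, hmemc⟩, rfl⟩
    · rintro ⟨k, ⟨hk, x, hx, hmemc⟩, rfl⟩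
      exact ⟨x, hx, k, hk, rfl, hmemc⟩
  have hperm : (cscSeen (csc_buildIdx cur_bvh) p).Perm L :=
    (List.perm_ext_iff_of_nodup hnodup hLnodup).2 hmem
  have hlen : (cscSeen (csc_buildIdx cur_bvh) p).length = L.length := hperm.length_eq
  rw [PySem.Set.len, hlen, hL, List.length_map, csc_countP_range]

lemma csc_inner (p : List Int) (cur_bvh : List (List Int)) (a : Int) :
    cur_bvh.foldl (fun acc c =>
        if 0 < (PySem.Set.inter p c).length then acc + 1 else acc) a
      = a + (cur_bvh.countP (fun c => decide (0 < (PySem.Set.inter p c).length)) : Int) := by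
  induction cur_bvh generalizing a with
  | nil => simp
  | cons c cs ih =>
    rw [List.foldl_cons, ih, List.countP_cons]
    by_cases h : 0 < (PySem.Set.inter p c).length
    · rw [if_pos h, decide_eq_true h, if_pos rfl]
      push_cast
      ring
    · rw [if_neg h, decide_eq_false h]
      push_cast
      ring

lemma csc_outer (prev_bvh cur_bvh : List (List Int)) (a : Int) :
    prev_bvh.foldl (fun exchange_time prev_pset =>
        cur_bvh.foldl (fun acc cur_pset =>
            if 0 < (PySem.Set.inter prev_pset cur_pset).length then acc + 1 else acc)
          exchange_time) a
      = prev_bvh.foldl (fun hits prev_pset =>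
          hits + PySem.Set.len (cscSeen (csc_buildIdx cur_bvh) prev_pset)) a := by
  simp only [csc_inner, csc_per_prev]

-- ===== VERDICT (by name: the statement is the Claim_ definition above) =====
theorem compute_switch_cost_spec : Claim_equal_compute_switch_cost := by
  intro prev_bvh cur_bvh _
  unfold Spec_compute_switch_cost compute_switch_cost compute_switch_cost_alt
  by_cases h : csc_bvhEq prev_bvh cur_bvh
  · simp [h]
  · simp only [h, Bool.false_eq_true, if_false]
    rw [csc_outer]
    rfl
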